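-- pv_equiv track=rewrite | github.com/serval-uni-lu/urs_test | chi2/chi2.py | count_repeats
-- ===== SOURCE A (Python) =====
-- def count_repeats(samples, sample_size):
--     d = set()
--
--     nb = 0
--     i = 0
--     for line in samples:
--         i += 1
--         if line in d:
--             nb += 1
--         d.add(line)
--         if i >= sample_size:
--             break
--     return nb
-- ===== SOURCE B (Python) =====
-- def count_repeats(samples, sample_size):
--     taken = sorted(samples[:max(sample_size, 0)])
--     return sum(x == y for x, y in zip(taken, taken[1:]))
-- ===== Notes on version B (the rewrite author's own statement) =====
-- stated objective: alternative
-- what changed: Replaces A's single-pass hash-set membership loop with running counter and break by sorting the first max(sample_size,0) items and counting adjacent equal pairs in the sorted prefix.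
import Mathlib
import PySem

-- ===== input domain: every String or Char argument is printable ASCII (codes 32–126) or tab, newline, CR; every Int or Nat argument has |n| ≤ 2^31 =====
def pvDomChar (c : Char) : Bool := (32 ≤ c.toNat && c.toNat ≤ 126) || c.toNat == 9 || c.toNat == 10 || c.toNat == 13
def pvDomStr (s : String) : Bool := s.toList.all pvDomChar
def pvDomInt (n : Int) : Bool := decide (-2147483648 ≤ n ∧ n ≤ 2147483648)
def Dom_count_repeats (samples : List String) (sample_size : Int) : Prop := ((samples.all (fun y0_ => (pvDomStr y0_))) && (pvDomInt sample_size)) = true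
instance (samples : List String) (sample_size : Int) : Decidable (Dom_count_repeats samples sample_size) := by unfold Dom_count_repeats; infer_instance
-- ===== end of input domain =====

-- B replaces A's single-pass hash-set membership loop (running counter + break) by
-- sorting the first max(sample_size,0) items and counting adjacent equal pairs; objective: alternative.

-- ===== PORT A =====
-- the for-loop of A: state (d, nb, i); break after an element once i ≥ sample_size
def countRepeatsLoop (l : List String) (d : PySem.Set String) (nb : Int) (i : Int) (ss : Int) : Int :=
  match l with
  | [] => nb
  | line :: rest =>
    let i' := i + 1
    let nb' := if PySem.Set.contains d line then nb + 1 else nb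
    let d' := PySem.Set.add d line
    if i' ≥ ss then nb' else countRepeatsLoop rest d' nb' i' ss

def count_repeats (samples : List String) (sample_size : Int) : Int :=
  countRepeatsLoop samples PySem.Set.empty 0 0 sample_size

-- ===== PORT B =====
def count_repeats_alt (samples : List String) (sample_size : Int) : Int :=
  let taken := PySem.List.sorted (samples.take (max sample_size 0).toNat) (fun x => x) false
  -- sum(x == y for x, y in zip(taken, taken[1:]))
  ((taken.zip taken.tail).map (fun p => if p.1 = p.2 then (1 : Int) else 0)).sum

-- ===== PRECONDITION & SPEC =====
def Spec_count_repeats (samples : List String) (sample_size : Int) (out : Int) : Prop := out = count_repeats_alt samples sample_size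
instance (samples : List String) (sample_size : Int) (out : Int) : Decidable (Spec_count_repeats samples sample_size out) := by unfold Spec_count_repeats; infer_instance

-- ===== CLAIM (what is proved, stated in full; the proofs are below) =====
def Claim_equal_count_repeats : Prop := ∀ (samples : List String) (sample_size : Int), Dom_count_repeats samples sample_size → Spec_count_repeats samples sample_size (count_repeats samples sample_size)

-- ===== LEMMAS AND PROOFS =====

-- number of repeats when scanning l against an accumulating set d
def dupCount (l : List String) (d : PySem.Set String) : Int :=
  match l with
  | [] => 0
  | x :: xs => (if PySem.Set.contains d x then 1 else 0) + dupCount xs (PySem.Set.add d x)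

lemma countRepeatsLoop_eq (l : List String) (d : PySem.Set String) (nb i ss : Int)
    (h : i < ss) :
    countRepeatsLoop l d nb i ss = nb + dupCount (l.take (ss - i).toNat) d := by
  induction l generalizing d nb i with
  | nil => simp [countRepeatsLoop, dupCount]
  | cons x xs ih =>
    have hpos : (ss - i).toNat = ((ss - i).toNat - 1) + 1 := by omega
    rw [hpos]
    simp only [countRepeatsLoop, List.take_succ_cons, dupCount]
    by_cases hb : i + 1 ≥ ss
    · have : (ss - i).toNat - 1 = 0 := by omega
      rw [this]
      simp [hb, dupCount]
      split_ifs <;> ring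
    · have h1 : i + 1 < ss := by omega
      rw [if_neg hb, ih _ _ _ h1]
      have : (ss - (i + 1)).toNat = (ss - i).toNat - 1 := by omega
      rw [this]
      split_ifs <;> ring

-- each scanned element either enlarges the set by one or is a repeat
lemma dupCount_card (l : List String) (d : PySem.Set String) :
    dupCount l d + ((PySem.Set.update d l).length : Int) = l.length + d.length := by
  induction l generalizing d with
  | nil => simp [dupCount, PySem.Set.update]
  | cons x xs ih =>
    rw [PySem.Set.update_cons]
    simp only [dupCount, List.length_cons]
    have ht := ih (PySem.Set.add d x)
    have hlen : ((PySem.Set.add d x).length : Int)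
        = d.length + (if PySem.Set.contains d x then 0 else 1) := by
      rw [PySem.Set.add_eq_ite]
      by_cases hm : x ∈ d
      · simp [hm]
      · simp [hm]
    push_cast at *
    split_ifs at * <;> omega

-- a nodup list with the same members as l has length = l.toFinset.card
lemma ofList_length_eq_card (l : List String) :
    ((PySem.Set.ofList l : List String).length : Int) = (l.toFinset.card : Int) := by
  have hnd : (PySem.Set.ofList l : List String).Nodup := PySem.Set.nodup_ofList l
  have hfs : (PySem.Set.ofList l : List String).toFinset = l.toFinset := by
    apply Finset.ext
    intro a
    simp [List.mem_toFinset, PySem.Set.mem_ofList]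
  have := List.toFinset_card_of_nodup hnd
  rw [← this, hfs]

-- in a (≤)-sorted list, adjacent equal pairs count = length - number of distinct elements
lemma adj_sum_sorted (s : List String) (hs : s.Pairwise (fun a b => a ≤ b)) :
    ((s.zip s.tail).map (fun p => if p.1 = p.2 then (1 : Int) else 0)).sum
      = (s.length : Int) - (s.toFinset.card : Int) := by
  induction s with
  | nil => simp
  | cons x t ih =>
    cases t with
    | nil => simp
    | cons y u =>
      have hxy : x ≤ y := (List.pairwise_cons.mp hs).1 y (by simp)
      have hrest : (y :: u).Pairwise (fun a b => a ≤ b) := (List.pairwise_cons.mp hs).2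
      have hIH := ih hrest
      have hcard_le : (y :: u).toFinset.card ≤ (y :: u).length := List.toFinset_card_le _
      simp only [List.tail_cons, List.zip_cons_cons, List.map_cons, List.sum_cons] at hIH ⊢
      by_cases hxy' : x = y
      · subst hxy'
        have : (x :: x :: u).toFinset = (x :: u).toFinset := by simp
        rw [this]
        simp only [List.length_cons] at hIH ⊢
        push_cast at *
        omega
      · have hxlt : x < y := lt_of_le_of_ne hxy hxy'
        have hxnot : x ∉ (y :: u) := by
          intro hmem
          rcases List.mem_cons.mp hmem with h | h
          · exact hxy' h
          · have : y ≤ x := (List.pairwise_cons.mp hrest).1 x h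
            exact absurd (lt_of_lt_of_le hxlt this) (lt_irrefl x)
        have hfin : (x :: y :: u).toFinset = insert x (y :: u).toFinset := by simp
        have hcard : (x :: y :: u).toFinset.card = (y :: u).toFinset.card + 1 := by
          rw [hfin, Finset.card_insert_of_notMem (by simpa using hxnot)]
        rw [if_neg hxy', hcard]
        simp only [List.length_cons] at hIH ⊢
        push_cast at *
        omega

-- ===== VERDICT (by name: the statement is the Claim_ definition above) =====
theorem count_repeats_spec : Claim_equal_count_repeats := by
  intro samples ss _
  unfold Spec_count_repeats count_repeats count_repeats_alt
  have key : ∀ (l : List String),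
      (((PySem.List.sorted l (fun x => x) false).zip (PySem.List.sorted l (fun x => x) false).tail).map
          (fun p => if p.1 = p.2 then (1 : Int) else 0)).sum
        = (l.length : Int) - (l.toFinset.card : Int) := by
    intro l
    have hp : (PySem.List.sorted l (fun x => x) false).Pairwise (fun a b => a ≤ b) := by
      simpa using PySem.List.sorted_pairwise l (fun x => x)
    rw [adj_sum_sorted _ hp]
    have hlen : (PySem.List.sorted l (fun x => x) false).length = l.length :=
      PySem.List.length_sorted l (fun x => x) false
    have hfs : (PySem.List.sorted l (fun x => x) false).toFinset = l.toFinset := by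
      apply Finset.ext
      intro a
      simp [List.mem_toFinset, PySem.List.mem_sorted]
    rw [hlen, hfs]
  by_cases hss : ss ≤ 0
  · have h0 : (max ss 0).toNat = 0 := by omega
    rw [key, h0]
    cases samples with
    | nil => simp [countRepeatsLoop]
    | cons x xs =>
      simp only [countRepeatsLoop, List.take_zero]
      rw [if_pos (by omega)]
      simp [PySem.Set.empty, PySem.Set.contains]
  · have hpos : 0 < ss := by omega
    have hmax : (max ss 0).toNat = (ss - 0).toNat := by omega
    rw [key, hmax, countRepeatsLoop_eq samples PySem.Set.empty 0 0 ss hpos]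
    set tk := samples.take (ss - 0).toNat with htk
    have h2 := dupCount_card tk PySem.Set.empty
    have hup : PySem.Set.update PySem.Set.empty tk = PySem.Set.ofList tk := rfl
    rw [hup] at h2
    have hz : (((PySem.Set.empty : PySem.Set String)).length : Int) = 0 := rfl
    rw [hz, add_zero] at h2
    have h3 := ofList_length_eq_card tk
    have hcard_le : tk.toFinset.card ≤ tk.length := List.toFinset_card_le _
    push_cast at *
    omega
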